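-- pv_equiv track=rewrite | github.com/VladimirTaDev/introduccion_a_programacion_tec_ii_2025 | mio/cuadrado_magico.py | es_matriz_con_enteros_consecutivos
-- ===== SOURCE A (Python) =====
-- def es_matriz_enteros(mat):
--     """
--     Verifica que mat es una lista de listas y todos los elementos son enteros.
--     Entradas y restricciones:
--     - mat: any, objeto a verificar.
--     Salidas:
--     - bool, True si mat es una matriz (lista de listas) y todos sus elementos
--       son enteros, False en caso contrario.
--     """
--     if not isinstance(mat, list):
--         return False
--     if len(mat) == 0:
--         return True
--     for fila in mat:
--         if not isinstance(fila, list):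
--             return False
--         if not all(isinstance(x, int) for x in fila):
--             return False
--     return True
--
-- def es_matriz_cuadrada(mat):
--     """
--     Verifica que mat es una matriz y que tiene el mismo número de filas y columnas.
--     Entradas y restricciones:
--     - mat: objeto a verificar.
--     Salidas:
--     - bool, True si mat es una matriz cuadrada (mismo número de filas y columnas)
--       con todos sus elementos enteros, False en caso contrario.
--     """
--     if not es_matriz_enteros(mat):
--         return False
--     n = len(mat)
--     if n == 0:
--         return True
--     return all(len(fila) == n for fila in mat)
--
-- def es_matriz_con_enteros_consecutivos(mat):
--     """
--     Verifica que una matriz cuadrada contenga los enteros consecutivos de 1 a n².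
--     Entradas y restricciones:
--     - mat: objeto a verificar.
--     Salidas:
--     - bool, True si mat es una matriz cuadrada que contiene exactamente los
--       enteros del 1 a n² (donde n es el tamaño de la matriz), False en caso contrario.
--     """
--     if not es_matriz_cuadrada(mat):
--         return False
--
--     n = len(mat)
--     if n == 0:
--         return False
--
--     # Crear un conjunto con todos los números de la matriz.
--     numeros_en_matriz = set()
--     for fila in mat:
--         for numero in fila:
--             numeros_en_matriz.add(numero)
--
--     # Crear un conjunto con los números consecutivos de 1 a n².
--     numeros_esperados = set(range(1, n * n + 1))
--
--     # Verificar que ambos conjuntos sean iguales.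
--     return numeros_en_matriz == numeros_esperados
-- ===== SOURCE B (Python) =====
-- def es_matriz_con_enteros_consecutivos(mat):
--     # B: validate shape in one pass, then flatten, sort and compare
--     # positionally against list(range(1, n*n+1)) instead of building sets.
--     if not isinstance(mat, list):
--         return False
--     n = len(mat)
--     if n == 0:
--         return False
--     for fila in mat:
--         if not isinstance(fila, list) or len(fila) != n:
--             return False
--         if not all(isinstance(x, int) for x in fila):
--             return False
--     flat = [x for fila in mat for x in fila]
--     return sorted(flat) == list(range(1, n * n + 1))
-- ===== Notes on version B (the rewrite author's own statement) =====
-- stated objective: alternative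
-- what changed: Replaces A's two-set build-and-compare (set of all entries vs set(range(1,n*n+1))) by a single validation pass followed by flatten + sort + positional comparison against list(range(1,n*n+1)); correct because the element count is pinned to n*n by the square check.
import Mathlib
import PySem

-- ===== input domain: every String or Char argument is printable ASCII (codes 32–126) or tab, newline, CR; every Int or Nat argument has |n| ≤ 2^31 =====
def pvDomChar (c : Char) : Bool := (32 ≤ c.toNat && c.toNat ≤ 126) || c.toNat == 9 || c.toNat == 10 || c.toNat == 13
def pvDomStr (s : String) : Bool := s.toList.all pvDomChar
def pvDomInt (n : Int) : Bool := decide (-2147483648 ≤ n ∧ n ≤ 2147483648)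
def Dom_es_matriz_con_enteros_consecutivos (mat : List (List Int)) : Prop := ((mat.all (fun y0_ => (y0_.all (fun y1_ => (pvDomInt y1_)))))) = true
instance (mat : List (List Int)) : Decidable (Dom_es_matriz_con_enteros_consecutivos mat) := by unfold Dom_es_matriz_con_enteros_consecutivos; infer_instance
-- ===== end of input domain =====

-- B replaces A's set-build-and-compare by flatten + sort + positional comparison with range(1, n*n+1); equal return values proved below.


-- ===== PORT A =====
-- under the type convention the isinstance checks are vacuously true
def es_matriz_enteros (mat : List (List Int)) : Bool :=
  if mat.length = 0 then true
  else mat.all (fun fila => fila.all (fun _ => true))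

def es_matriz_cuadrada (mat : List (List Int)) : Bool :=
  if !es_matriz_enteros mat then false
  else
    let n : Int := mat.length
    if n = 0 then true
    else mat.all (fun fila => (fila.length : Int) == n)

def es_matriz_con_enteros_consecutivos (mat : List (List Int)) : Bool :=
  if !es_matriz_cuadrada mat then false
  else
    let n : Int := mat.length
    if n = 0 then false
    else
      let numeros_en_matriz : PySem.Set Int :=
        mat.foldl (fun s fila => fila.foldl (fun s numero => PySem.Set.add s numero) s) PySem.Set.empty
      let numeros_esperados : PySem.Set Int := PySem.Set.ofList (PySem.List.pyRange 1 (n * n + 1) 1)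
      PySem.Set.equal numeros_en_matriz numeros_esperados

-- ===== PORT B =====
def es_matriz_con_enteros_consecutivos_alt (mat : List (List Int)) : Bool :=
  let n : Int := mat.length
  if n = 0 then false
  else if !(mat.all (fun fila => (fila.length : Int) == n)) then false
  else
    let flat : List Int := mat.foldr (fun fila acc => fila ++ acc) []
    PySem.List.sorted flat (fun x => x) false == PySem.List.pyRange 1 (n * n + 1) 1

-- ===== PRECONDITION & SPEC =====
def Spec_es_matriz_con_enteros_consecutivos (mat : List (List Int)) (out : Bool) : Prop := out = es_matriz_con_enteros_consecutivos_alt mat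
instance (mat : List (List Int)) (out : Bool) : Decidable (Spec_es_matriz_con_enteros_consecutivos mat out) := by unfold Spec_es_matriz_con_enteros_consecutivos; infer_instance

-- ===== CLAIM (what is proved, stated in full; the proofs are below) =====
def Claim_equal_es_matriz_con_enteros_consecutivos : Prop := ∀ (mat : List (List Int)), Dom_es_matriz_con_enteros_consecutivos mat → Spec_es_matriz_con_enteros_consecutivos mat (es_matriz_con_enteros_consecutivos mat)

-- ===== LEMMAS AND PROOFS =====

theorem foldr_append_eq_flatten (mat : List (List Int)) :
    mat.foldr (fun fila acc => fila ++ acc) [] = mat.flatten := by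
  induction mat with
  | nil => rfl
  | cons f t ih => simp [List.flatten, ih]

theorem A_fold_eq_ofList_flatten (mat : List (List Int)) :
    mat.foldl (fun s fila => fila.foldl (fun s numero => PySem.Set.add s numero) s) PySem.Set.empty
      = PySem.Set.ofList mat.flatten := by
  rw [PySem.Set.ofList_eq_foldl, List.foldl_flatten]
  rfl

theorem length_flatten_sq (mat : List (List Int)) (n : Int)
    (hn : n = (mat.length : Int))
    (h : mat.all (fun fila => (fila.length : Int) == n) = true) :
    ((mat.flatten.length : Int)) = n * n := by
  subst hn
  simp only [List.all_eq_true, beq_iff_eq] at h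
  have hlen : (mat.map List.length).sum = mat.length * mat.length := by
    have : ∀ fila ∈ mat, fila.length = mat.length := by
      intro f hf; exact_mod_cast h f hf
    calc (mat.map List.length).sum = (mat.map (fun _ => mat.length)).sum := by
          rw [List.map_congr_left this]
      _ = mat.length * mat.length := by
          simp [List.map_const', List.sum_replicate, smul_eq_mul]
  rw [List.length_flatten, hlen]; push_cast; ring

-- core equivalence: with |F| = n², set-equality with {1..n²} ↔ sorted F = [1..n²]
theorem sets_equal_iff_sorted_eq (F : List Int) (n : Int)
    (hlen : (F.length : Int) = n * n) :
    PySem.Set.equal (PySem.Set.ofList F) (PySem.Set.ofList (PySem.List.pyRange 1 (n * n + 1) 1))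
      = (PySem.List.sorted F (fun x => x) false == PySem.List.pyRange 1 (n * n + 1) 1) := by
  set R := PySem.List.pyRange 1 (n * n + 1) 1 with hR
  have hRnodup : R.Nodup := PySem.List.nodup_pyRange_one 1 (n * n + 1)
  have hRlen : (R.length : Int) = n * n := by
    rw [hR, PySem.List.length_pyRange_one]
    omega
  have hFR : F.length = R.length := by omega
  have hofR : PySem.Set.ofList R = R := PySem.Set.ofList_eq_self_of_nodup R hRnodup
  rw [hofR]
  by_cases hperm : F.Perm R
  · have hsorted : PySem.List.sorted F (fun x => x) false = R :=
      PySem.List.sorted_eq_of_perm_of_pairwise_lt F R (fun x => x) hperm.symm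
        (PySem.List.pairwise_lt_pyRange_one 1 (n * n + 1))
    rw [hsorted]
    have : PySem.Set.equal (PySem.Set.ofList F) R = true := by
      rw [PySem.Set.equal_iff]
      intro x
      rw [PySem.Set.mem_ofList]
      exact hperm.mem_iff
    simp [this]
  · have hne : PySem.List.sorted F (fun x => x) false ≠ R := by
      intro hEq
      exact hperm ((PySem.List.sorted_perm F (fun x => x) false).symm.trans (hEq ▸ List.Perm.refl _)).symm.symm
    have heq : PySem.Set.equal (PySem.Set.ofList F) R = false := by
      by_contra hcon
      have : PySem.Set.equal (PySem.Set.ofList F) R = true := by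
        cases hc : PySem.Set.equal (PySem.Set.ofList F) R
        · exact absurd hc hcon
        · rfl
      rw [PySem.Set.equal_iff] at this
      -- members of F = members of R; R nodup, R ⊆ F, |F| = |R| ⟹ F ~ R
      have hsub : R ⊆ F := by
        intro x hx
        have := (this x).mpr hx
        rwa [PySem.Set.mem_ofList] at this
      have hsubperm : R.Subperm F := hRnodup.subperm hsub
      have : R.Perm F := hsubperm.perm_of_length_le (by omega)
      exact hperm this.symm
    rw [heq]
    simp [hne]

-- ===== VERDICT (by name: the statement is the Claim_ definition above) =====
theorem es_matriz_con_enteros_consecutivos_spec : Claim_equal_es_matriz_con_enteros_consecutivos := by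
  intro mat _
  unfold Spec_es_matriz_con_enteros_consecutivos
  unfold es_matriz_con_enteros_consecutivos es_matriz_con_enteros_consecutivos_alt
  unfold es_matriz_cuadrada es_matriz_enteros
  by_cases hn : (mat.length : Int) = 0
  · have hmat : mat = [] := by
      cases mat with
      | nil => rfl
      | cons a t => exfalso; simp at hn; omega
    subst hmat
    simp
  · have hne : mat.length ≠ 0 := by omega
    by_cases hsq : mat.all (fun fila => (fila.length : Int) == (mat.length : Int)) = true
    · simp only [hne, hn, hsq, if_false, Bool.not_true]
      simp only [List.all_eq_true] at hsq ⊢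
      rw [A_fold_eq_ofList_flatten mat,
        sets_equal_iff_sorted_eq mat.flatten (mat.length : Int)
          (length_flatten_sq mat (mat.length : Int) rfl (by simpa using hsq))]
      rw [foldr_append_eq_flatten]
      simp
    · simp [hne, hsq]
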